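-- pv_equiv track=rewrite | github.com/HojiReiner/College-Projects | FP/Project1/Labrinth.py | posicoes_adjacentes
-- ===== SOURCE A (Python) =====
-- def eh_posicao(posicao):
--     """ Funcao que recebe um argumento de qualquer tipo e devolve True se o
--     seu argumento corresponde a uma posicao e False caso contrario"""
--
-- #Verifica se o argumento e um tuplo
--     if type(posicao) is not tuple:
--         return False
--
-- #Verifica se o argumento so tem 2 elementos
--     elif len(posicao) != 2:
--         return False
--
-- #Verifica se os elementos sao inteiros nao negativos
--     for e in posicao:
--         if type(e) is not int:
--             return False
--         elif e < 0:
--             return False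
--
--     return True
--
-- def posicoes_adjacentes(posicao):
--     """Funcao que recebe uma posicao e devolve o conjunto de posicoes adjacentes
--     da posicao em ordem de leitura de um labirinto."""
--
-- #Verifica se o argumento e uma posicao valida
--     if not eh_posicao(posicao):
--         raise ValueError('posicoes_adjacentes: argumento invalido')
--
-- #Encontra as posicoes adjacentes
--     posicao_adj1 = (posicao[0],posicao[1]-1)
--     posicao_adj2 = (posicao[0]-1,posicao[1])
--     posicao_adj3 = (posicao[0]+1,posicao[1])
--     posicao_adj4 = (posicao[0],posicao[1]+1)
--
-- #Verifica se as posicoes adjacentes sao validas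
--     posicoes_adj =(posicao_adj1,posicao_adj2,posicao_adj3,posicao_adj4)
--     posicoes_adj_filtradas = ()
--     for posicao_adj in posicoes_adj:
--         if eh_posicao(posicao_adj):
--             posicoes_adj_filtradas = posicoes_adj_filtradas + ((posicao_adj),)
--
--     return (posicoes_adj_filtradas)
-- ===== SOURCE B (Python) =====
-- # Table-driven: a static dict keyed by the boundary flags (r==0, c==0) holds the
-- # offset vectors in reading order; the result is one map adding the offsets.
-- _OFFSETS = {
--     (False, False): ((0, -1), (-1, 0), (1, 0), (0, 1)),
--     (False, True):  ((-1, 0), (1, 0), (0, 1)),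
--     (True, False):  ((0, -1), (1, 0), (0, 1)),
--     (True, True):   ((1, 0), (0, 1)),
-- }
--
-- def posicoes_adjacentes(posicao):
--     """Devolve as posicoes adjacentes em ordem de leitura, por tabela de
--     deslocamentos indexada pelas flags de fronteira."""
--     if (type(posicao) is not tuple or len(posicao) != 2
--             or any(type(e) is not int or e < 0 for e in posicao)):
--         raise ValueError('posicoes_adjacentes: argumento invalido')
--     r, c = posicao
--     return tuple((r + dr, c + dc) for dr, dc in _OFFSETS[(r == 0, c == 0)])
-- ===== Notes on version B (the rewrite author's own statement) =====
-- stated objective: alternative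
-- what changed: B replaces generate-four-candidates-then-filter-through-eh_posicao with a static offset table indexed by the boundary flags (r==0, c==0) and a single map that adds the chosen offsets.
import Mathlib
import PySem

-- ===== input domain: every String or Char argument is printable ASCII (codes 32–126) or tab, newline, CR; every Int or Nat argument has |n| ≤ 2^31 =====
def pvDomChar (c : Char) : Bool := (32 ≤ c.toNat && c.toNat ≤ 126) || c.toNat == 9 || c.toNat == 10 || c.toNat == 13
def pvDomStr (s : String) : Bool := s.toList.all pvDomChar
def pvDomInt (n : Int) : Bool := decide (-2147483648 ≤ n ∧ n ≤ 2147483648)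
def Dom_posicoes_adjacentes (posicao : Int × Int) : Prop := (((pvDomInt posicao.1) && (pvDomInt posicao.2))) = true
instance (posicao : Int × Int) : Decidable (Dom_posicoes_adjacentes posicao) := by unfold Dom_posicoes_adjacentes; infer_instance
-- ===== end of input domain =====

-- B replaces candidate building + eh_posicao filtering with a static offset table
-- indexed by the boundary flags (r==0, c==0) plus one map (objective: alternative).

-- ===== PORT A =====
-- eh_posicao on an (Int × Int) pair: the tuple/length/int type checks hold by the type convention,
-- leaving the non-negativity test of both components (exact on this domain).
def eh_posicao (p : Int × Int) : Bool := decide (0 ≤ p.1) && decide (0 ≤ p.2)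

def posicoes_adjacentes (posicao : Int × Int) : List (Int × Int) :=
  -- the `if not eh_posicao: raise ValueError` path is excluded by Pre_
  let posicao_adj1 := (posicao.1, posicao.2 - 1)
  let posicao_adj2 := (posicao.1 - 1, posicao.2)
  let posicao_adj3 := (posicao.1 + 1, posicao.2)
  let posicao_adj4 := (posicao.1, posicao.2 + 1)
  let posicoes_adj := [posicao_adj1, posicao_adj2, posicao_adj3, posicao_adj4]
  posicoes_adj.foldl (fun acc p => if eh_posicao p then acc ++ [p] else acc) []

-- ===== PORT B =====
-- the static _OFFSETS table of Source B, keyed by the flags (r == 0, c == 0)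
def pvOffsets (k : Bool × Bool) : List (Int × Int) :=
  match k with
  | (false, false) => [(0, -1), (-1, 0), (1, 0), (0, 1)]
  | (false, true)  => [(-1, 0), (1, 0), (0, 1)]
  | (true, false)  => [(0, -1), (1, 0), (0, 1)]
  | (true, true)   => [(1, 0), (0, 1)]

def posicoes_adjacentes_alt (posicao : Int × Int) : List (Int × Int) :=
  let r := posicao.1
  let c := posicao.2
  (pvOffsets (r == 0, c == 0)).map (fun d => (r + d.1, c + d.2))

-- ===== PRECONDITION & SPEC =====
-- A raises ValueError exactly when a coordinate is negative; Pre_ excludes those inputs.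
def Pre_posicoes_adjacentes (posicao : Int × Int) : Prop := 0 ≤ posicao.1 ∧ 0 ≤ posicao.2
instance (posicao : Int × Int) : Decidable (Pre_posicoes_adjacentes posicao) := by unfold Pre_posicoes_adjacentes; infer_instance
def pvWitness_posicoes_adjacentes : (Int × Int) := (1, 1)

def Spec_posicoes_adjacentes (posicao : Int × Int) (out : List (Int × Int)) : Prop := out = posicoes_adjacentes_alt posicao
instance (posicao : Int × Int) (out : List (Int × Int)) : Decidable (Spec_posicoes_adjacentes posicao out) := by unfold Spec_posicoes_adjacentes; infer_instance

-- ===== CLAIM =====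
def Claim_equal_posicoes_adjacentes : Prop := ∀ (posicao : Int × Int), Dom_posicoes_adjacentes posicao → Pre_posicoes_adjacentes posicao → Spec_posicoes_adjacentes posicao (posicoes_adjacentes posicao)

-- ===== LEMMAS AND PROOFS =====

-- ===== VERDICT =====
theorem posicoes_adjacentes_spec : Claim_equal_posicoes_adjacentes := by
  intro ⟨r, c⟩ _ ⟨hr, hc⟩
  unfold Spec_posicoes_adjacentes posicoes_adjacentes posicoes_adjacentes_alt eh_posicao
  by_cases h1 : r = 0 <;> by_cases h2 : c = 0
  · simp [h1, h2, pvOffsets, List.foldl]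
  · have hc1 : (1:Int) ≤ c := by omega
    have hc2 : (0:Int) ≤ c + 1 := by omega
    have hb : (c == 0) = false := by simp [h2]
    simp [h1, hb, pvOffsets, List.foldl, hc, hc1, hc2, sub_eq_add_neg]
  · have hr1 : (1:Int) ≤ r := by omega
    have hr2 : (0:Int) ≤ r + 1 := by omega
    have hb : (r == 0) = false := by simp [h1]
    simp [hb, h2, pvOffsets, List.foldl, hr, hr1, hr2, sub_eq_add_neg]
  · have hc1 : (1:Int) ≤ c := by omega
    have hc2 : (0:Int) ≤ c + 1 := by omega
    have hr1 : (1:Int) ≤ r := by omega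
    have hr2 : (0:Int) ≤ r + 1 := by omega
    have hbr : (r == 0) = false := by simp [h1]
    have hbc : (c == 0) = false := by simp [h2]
    simp [hbr, hbc, pvOffsets, List.foldl, hr, hc, hr1, hr2, hc1, hc2, sub_eq_add_neg]
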